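-- pv_equiv track=rewrite | github.com/T-Level-2024/Storage | 30178812 Old/shift_sentence.py | shift_sentence
-- ===== SOURCE A (Python) =====
-- def shift_sentence(txt):
--     txt = txt.split(" ")
--     txt.reverse()
--     for i in range(len(txt)):
--         txt[i] = list(txt[i])
--     for i in range(len(txt)-1):
--         txt[i][0], txt[i+1][0] = txt[i+1][0], txt[i][0]
--         txt[i] = "".join(txt[i])
--     txt.reverse()
--     txt[0] = "".join(txt[0])
--     return " ".join(txt)
-- ===== SOURCE B (Python) =====
-- def shift_sentence(txt):
--     words = txt.split(" ")
--     if len(words) <= 1: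
--         return txt
--     firsts = [w[0] for w in words]
--     rotated = [firsts[-1]] + firsts[:-1]
--     return " ".join(r + w[1:] for r, w in zip(rotated, words))
-- ===== Notes on version B (the rewrite author's own statement) =====
-- stated objective: simpler
-- what changed: A reverses the word list and chain-swaps adjacent first letters in place with indexed mutation; B directly rotates the list of first letters (last one to the front) and zips it back onto the word tails, with no reversal or in-place swapping.
import Mathlib
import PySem

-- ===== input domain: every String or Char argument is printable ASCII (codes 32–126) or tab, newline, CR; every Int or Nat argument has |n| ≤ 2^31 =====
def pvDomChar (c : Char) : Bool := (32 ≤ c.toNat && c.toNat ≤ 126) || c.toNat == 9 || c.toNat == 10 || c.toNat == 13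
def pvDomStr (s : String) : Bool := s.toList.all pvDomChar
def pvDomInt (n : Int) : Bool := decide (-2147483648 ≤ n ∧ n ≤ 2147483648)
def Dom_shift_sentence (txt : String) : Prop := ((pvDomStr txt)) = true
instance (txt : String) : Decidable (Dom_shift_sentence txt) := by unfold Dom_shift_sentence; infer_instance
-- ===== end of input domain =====

-- B cyclically right-shifts the first letter of each word by rotating the list of first
-- letters and zipping it onto the word tails, instead of A's reverse + in-place adjacent swaps (objective: simpler).

-- ===== PORT A =====
-- A's second for-loop: for i in range(len(txt)-1): swap txt[i][0], txt[i+1][0]; txt[i]="".join(txt[i]).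
-- Words are kept as List Char ("".join / list() are identities of this representation); an empty word
-- at position i or i+1 is Python's IndexError (outside Pre_): that case leaves the list unchanged here.
def shiftSwapLoop : List (List Char) → List (List Char)
  | (a :: t1) :: (b :: t2) :: rest => (b :: t1) :: shiftSwapLoop ((a :: t2) :: rest)
  | l => l
  termination_by l => l.length

def shift_sentence (txt : String) : String :=
  let ws := PySem.Chars.splitOn txt.toList [' ']   -- txt = txt.split(" ")
  let ws := ws.reverse                             -- txt.reverse()
  -- for i in range(len(txt)): txt[i] = list(txt[i])  — identity in the List Char representation
  let ws := shiftSwapLoop ws                       -- the swap-and-join loop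
  let ws := ws.reverse                             -- txt.reverse()
  -- txt[0] = "".join(txt[0])  — identity in the List Char representation
  String.ofList (PySem.Chars.join [' '] ws)        -- return " ".join(txt)

-- ===== PORT B =====
def shift_sentence_alt (txt : String) : String :=
  let ws := PySem.Chars.splitOn txt.toList [' ']                         -- words = txt.split(" ")
  if ws.length ≤ 1 then txt
  else
    let firsts := ws.map (fun w => (PySem.List.pyGet? w 0).getD ' ')     -- [w[0] for w in words]; w[0] of an empty word is IndexError, outside Pre_
    let rotated := (PySem.List.pyGet? firsts (-1)).getD ' '
                     :: PySem.List.slice firsts none (some (-1))         -- [firsts[-1]] + firsts[:-1]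
    String.ofList (PySem.Chars.join [' ']
      (List.zipWith (fun r w => r :: PySem.List.slice w (some 1) none) rotated ws))  -- " ".join(r + w[1:] …)

-- ===== PRECONDITION & SPEC =====
-- Pre_ excludes exactly the inputs where A raises IndexError: two or more words (split on " ")
-- with some word empty, i.e. a leading/trailing/double space in a multi-word sentence.
def Pre_shift_sentence (txt : String) : Prop :=
  (PySem.Chars.splitOn txt.toList [' ']).length ≤ 1 ∨
    ∀ w ∈ PySem.Chars.splitOn txt.toList [' '], w ≠ []
instance (txt : String) : Decidable (Pre_shift_sentence txt) := by
  unfold Pre_shift_sentence; infer_instance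
def pvWitness_shift_sentence : String := "hello world foo"

def Spec_shift_sentence (txt : String) (out : String) : Prop := out = shift_sentence_alt txt
instance (txt : String) (out : String) : Decidable (Spec_shift_sentence txt out) := by unfold Spec_shift_sentence; infer_instance

-- ===== CLAIM (what is proved, stated in full; the proofs are below) =====
def Claim_equal_shift_sentence : Prop := ∀ (txt : String), Dom_shift_sentence txt → Pre_shift_sentence txt → Spec_shift_sentence txt (shift_sentence txt)

-- ===== LEMMAS AND PROOFS =====

-- splitOn's worker returns strictly more pieces than it was handed.
theorem len_splitOn_go (sep : List Char) :
    ∀ (fuel : Nat) (l cur : List Char) (acc : List (List Char)),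
      acc.length < (PySem.Chars.splitOn.go sep fuel l cur acc).length := by
  intro fuel
  induction fuel with
  | zero => intro l cur acc; simp [PySem.Chars.splitOn.go]
  | succ n ih =>
    intro l cur acc
    cases l with
    | nil => simp [PySem.Chars.splitOn.go]
    | cons c rest =>
      rw [PySem.Chars.splitOn.go]
      split
      · exact Nat.lt_of_succ_lt (by simpa using ih _ _ (cur.reverse :: acc))
      · exact ih _ _ _

-- If the worker produced a single piece, no separator was ever consumed: the piece is everything.
theorem splitOn_go_single (sep : List Char) :
    ∀ (fuel : Nat) (l cur : List Char) (w : List Char),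
      PySem.Chars.splitOn.go sep fuel l cur [] = [w] → w = cur.reverse ++ l := by
  intro fuel
  induction fuel with
  | zero => intro l cur w h; simpa [PySem.Chars.splitOn.go] using h.symm
  | succ n ih =>
    intro l cur w h
    cases l with
    | nil => simpa [PySem.Chars.splitOn.go] using h.symm
    | cons c rest =>
      rw [PySem.Chars.splitOn.go] at h
      split at h
      · exfalso
        have := len_splitOn_go sep n (List.drop sep.length (c :: rest)) [] [cur.reverse]
        rw [h] at this; simp at this
      · simpa using ih rest (c :: cur) w h

theorem splitOn_singleton (cs sep w : List Char)
    (h : PySem.Chars.splitOn cs sep = [w]) : w = cs := by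
  simpa using splitOn_go_single sep (cs.length + 1) cs [] w h

theorem splitOn_ne_nil (cs sep : List Char) : PySem.Chars.splitOn cs sep ≠ [] := by
  intro h
  have := len_splitOn_go sep (cs.length + 1) cs [] []
  rw [PySem.Chars.splitOn] at h
  rw [h] at this; simp at this

-- The chain of adjacent head swaps rotates the first letters one step toward the front
-- (in the traversal order): element i gets the head of element i+1, the last gets the head of the first.
theorem shiftSwapLoop_eq (a : Char) (t : List Char) :
    ∀ (rest : List (List Char)), (∀ w ∈ rest, w ≠ []) →
      shiftSwapLoop ((a :: t) :: rest) =
        List.zipWith (fun h w => h :: List.tail w)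
          (rest.map (fun w => w.headD ' ') ++ [a]) ((a :: t) :: rest) := by
  intro rest
  induction rest generalizing a t with
  | nil => intro _; simp [shiftSwapLoop]
  | cons w2 rest' ih =>
    intro hne
    obtain ⟨b, t2, rfl⟩ : ∃ b t2, w2 = b :: t2 := by
      cases w2 with
      | nil => exact absurd rfl (hne [] (by simp))
      | cons b t2 => exact ⟨b, t2, rfl⟩
    have hrest' : ∀ w ∈ rest', w ≠ [] := fun w hw => hne w (by simp [hw])
    rw [shiftSwapLoop, ih a t2 hrest']
    cases hm : List.map (fun w => w.headD ' ') rest' ++ [a] with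
    | nil => simp at hm
    | cons k ks =>
        simp only [List.map_cons, List.cons_append, List.zipWith, List.tail_cons]
        rw [hm]
        simp [List.zipWith]

-- Under Pre_, with at least two words, both programs build the same list of shifted words.
theorem core_eq (ws : List (List Char)) (hlen : 2 ≤ ws.length)
    (hne : ∀ w ∈ ws, w ≠ []) :
    (shiftSwapLoop ws.reverse).reverse =
      List.zipWith (fun r w => r :: PySem.List.slice w (some 1) none)
        ((PySem.List.pyGet? (ws.map fun w => (PySem.List.pyGet? w 0).getD ' ') (-1)).getD ' '
          :: PySem.List.slice (ws.map fun w => (PySem.List.pyGet? w 0).getD ' ') none (some (-1))) ws := by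
  have hwne : ws ≠ [] := by intro h; subst h; simp at hlen
  obtain ⟨g, hg, hws⟩ : ∃ g, g ∈ ws ∧ ws = ws.dropLast ++ [g] := by
    refine ⟨ws.getLast hwne, List.getLast_mem hwne, (List.dropLast_append_getLast hwne).symm⟩
  obtain ⟨a, t, rfl⟩ : ∃ a t, g = a :: t := by
    cases g with
    | nil => exact absurd rfl (hne [] hg)
    | cons a t => exact ⟨a, t, rfl⟩
  generalize hp : ws.dropLast = p at hws
  have hpne : ∀ w ∈ p, w ≠ [] := by
    intro w hw; exact hne w (by rw [hws]; simp [hw])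
  rw [hws]
  have hprev : ∀ w ∈ p.reverse, w ≠ [] := by intro w hw; exact hpne w (by simpa using hw)
  have h1 : (p ++ [a :: t]).reverse = (a :: t) :: p.reverse := by simp
  rw [h1, shiftSwapLoop_eq a t p.reverse hprev,
      List.reverse_zipWith (by simp)]
  have h2 : ((a :: t) :: p.reverse).reverse = p ++ [a :: t] := by simp
  have h3 : (List.map (fun w => w.headD ' ') p.reverse ++ [a]).reverse
      = a :: List.map (fun w => w.headD ' ') p := by simp
  rw [h2, h3]
  -- B side: firsts and the rotation
  have hmap : (p ++ [a :: t]).map (fun w => (PySem.List.pyGet? w 0).getD ' ')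
      = (p.map (fun w => w.headD ' ')) ++ [a] := by
    rw [List.map_append]
    congr 1
    · refine List.map_congr_left ?_
      intro w hw
      cases w with
      | nil => exact absurd rfl (hpne [] hw)
      | cons c cs => simp
    · simp
  rw [hmap, PySem.List.pyGet?_neg_one_append_singleton, PySem.List.slice_to_neg_one,
      List.dropLast_concat]
  simp only [Option.getD_some, PySem.List.slice_from_one]

theorem main_eq (txt : String) (h : Pre_shift_sentence txt) :
    shift_sentence txt = shift_sentence_alt txt := by
  unfold shift_sentence shift_sentence_alt
  by_cases hle : (PySem.Chars.splitOn txt.toList [' ']).length ≤ 1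
  · simp only [hle, if_pos]
    obtain ⟨w, hw⟩ : ∃ w, PySem.Chars.splitOn txt.toList [' '] = [w] := by
      have h0 := splitOn_ne_nil txt.toList [' ']
      rcases heq : PySem.Chars.splitOn txt.toList [' '] with _ | ⟨w, ws'⟩
      · exact absurd heq h0
      · rw [heq] at hle
        simp at hle
        exact ⟨w, by rw [hle]⟩
    have hwtxt : w = txt.toList := splitOn_singleton _ _ _ hw
    rw [hw, hwtxt]
    have hloop : shiftSwapLoop [txt.toList] = [txt.toList] := by
      cases h : txt.toList with
      | nil => simp [shiftSwapLoop]
      | cons c cs => simp [shiftSwapLoop]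
    simp [hloop, PySem.Chars.join_singleton, String.ofList]
  · have hlen : 2 ≤ (PySem.Chars.splitOn txt.toList [' ']).length := by omega
    have hne : ∀ w ∈ PySem.Chars.splitOn txt.toList [' '], w ≠ [] := by
      rcases h with h | h
      · omega
      · exact h
    simp only [hle, if_false]
    rw [core_eq _ hlen hne]

-- ===== VERDICT (by name: the statement is the Claim_ definition above) =====
theorem shift_sentence_spec : Claim_equal_shift_sentence := by
  intro txt _ hpre
  exact main_eq txt hpre
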